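-- pv_equiv track=rewrite | github.com/Isaxc0/Biometric-and-cognitive-graphical-authentication | Data analysis/src/participant.py | separate_connections
-- ===== SOURCE A (Python) =====
-- def separate_connections(drawing):
--     """Separates all coordinates between each connection made to a node
--     :arg
--         drawing (list): drawing data for that stage
--     """
--     connections = []  # 2d list with separated coordinates by each connection
--     connection_data = []  # holds current coords for this connection
--     for i in range(1, len(drawing)):
--         if drawing[i][3] == "1":
--             connections.append(connection_data)
--             connection_data = []
--         if drawing[i][0] == "end":  # stop when last node is connected
--             break
--         else:
--             connection_data.append((drawing[i][0], drawing[i][1], drawing[i][2], drawing[i][3]))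
--
--     return connections
-- ===== SOURCE B (Python) =====
-- def separate_connections(drawing):
--     """Separates all coordinates between each connection made to a node
--     :arg
--         drawing (list): drawing data for that stage
--     """
--     tuples = []   # all 4-tuples seen so far, flat
--     bounds = []   # positions in `tuples` where a '1' flag closed a group
--     for r in drawing[1:]:
--         if r[3] == "1":
--             bounds.append(len(tuples))
--         if r[0] == "end":  # stop when last node is connected
--             break
--         tuples.append((r[0], r[1], r[2], r[3]))
--     return [tuples[a:b] for a, b in zip([0] + bounds, bounds)]
-- ===== Notes on version B (the rewrite author's own statement) =====
-- stated objective: alternative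
-- what changed: Instead of maintaining a per-connection accumulator that is flushed into the result at each '1' flag, B records every 4-tuple in one flat list while noting the boundary positions of '1' flags, then reconstructs the connections by slicing the flat list between consecutive boundaries.
import Mathlib
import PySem

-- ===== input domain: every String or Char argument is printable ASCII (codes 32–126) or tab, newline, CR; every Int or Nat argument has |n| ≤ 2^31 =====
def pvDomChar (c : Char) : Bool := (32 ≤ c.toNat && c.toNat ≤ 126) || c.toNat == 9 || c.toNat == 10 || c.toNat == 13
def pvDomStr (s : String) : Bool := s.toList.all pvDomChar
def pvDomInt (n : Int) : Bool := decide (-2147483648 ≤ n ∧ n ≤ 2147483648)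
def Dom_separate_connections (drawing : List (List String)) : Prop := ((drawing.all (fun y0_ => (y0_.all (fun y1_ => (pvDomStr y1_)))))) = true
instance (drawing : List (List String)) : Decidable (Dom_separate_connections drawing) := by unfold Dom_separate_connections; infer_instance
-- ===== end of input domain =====

-- B replaces A's flush-on-flag accumulator with a flat tuple list plus recorded
-- boundary positions, reconstructing the groups by slicing (objective: alternative).


-- ===== PORT A =====
-- A's loop over drawing[1:]: current-connection accumulator `cur`, flushed into
-- `acc` whenever row[3] == "1"; break on row[0] == "end".
def sepLoopA : List (List String) → List (String × String × String × String) →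
    List (List (String × String × String × String)) → List (List (String × String × String × String))
  | [], _, acc => acc
  | r :: rs, cur, acc =>
    let st := if PySem.List.pyGetD r 3 "" == "1" then (acc ++ [cur], ([] : List (String × String × String × String))) else (acc, cur)
    if PySem.List.pyGetD r 0 "" == "end" then st.1
    else sepLoopA rs (st.2 ++ [(PySem.List.pyGetD r 0 "", PySem.List.pyGetD r 1 "", PySem.List.pyGetD r 2 "", PySem.List.pyGetD r 3 "")]) st.1

def separate_connections (drawing : List (List String)) : List (List (String × String × String × String)) :=
  sepLoopA drawing.tail [] []

-- ===== PORT B =====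
-- B's first pass: flat list of tuples plus boundary positions; break on "end".
def sepLoopB : List (List String) → List (String × String × String × String) →
    List Int → List (String × String × String × String) × List Int
  | [], tuples, bounds => (tuples, bounds)
  | r :: rs, tuples, bounds =>
    let bounds := if PySem.List.pyGetD r 3 "" == "1" then bounds ++ [(tuples.length : Int)] else bounds
    if PySem.List.pyGetD r 0 "" == "end" then (tuples, bounds)
    else sepLoopB rs (tuples ++ [(PySem.List.pyGetD r 0 "", PySem.List.pyGetD r 1 "", PySem.List.pyGetD r 2 "", PySem.List.pyGetD r 3 "")]) bounds

def separate_connections_alt (drawing : List (List String)) : List (List (String × String × String × String)) :=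
  let st := sepLoopB (PySem.List.slice drawing (some 1) none) [] []
  (List.zip ((0 : Int) :: st.2) st.2).map (fun p => PySem.List.slice st.1 (some p.1) (some p.2))

-- ===== PRECONDITION & SPEC =====
-- Pre_: every row the loop actually visits (those of drawing[1:] up to and
-- including the first row whose head is "end") has at least 4 entries;
-- otherwise Python A raises IndexError at drawing[i][3].
def Pre_separate_connections (drawing : List (List String)) : Prop :=
  ∀ r ∈ drawing.tail.takeWhile (fun r => decide (r.head? ≠ some "end")) ++
        (drawing.tail.dropWhile (fun r => decide (r.head? ≠ some "end"))).take 1,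
    4 ≤ r.length
instance (drawing : List (List String)) : Decidable (Pre_separate_connections drawing) := by unfold Pre_separate_connections; infer_instance
def pvWitness_separate_connections : List (List String) :=
  [["h"], ["a", "b", "c", "0"], ["x", "y", "z", "1"], ["end", "e", "e", "1"]]
def Spec_separate_connections (drawing : List (List String)) (out : List (List (String × String × String × String))) : Prop := out = separate_connections_alt drawing
instance (drawing : List (List String)) (out : List (List (String × String × String × String))) : Decidable (Spec_separate_connections drawing out) := by unfold Spec_separate_connections; infer_instance

-- ===== CLAIM (what is proved, stated in full; the proofs are below) =====
def Claim_equal_separate_connections : Prop := ∀ (drawing : List (List String)), Dom_separate_connections drawing → Pre_separate_connections drawing → Spec_separate_connections drawing (separate_connections drawing)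

-- ===== LEMMAS AND PROOFS =====

-- Boundary positions generated by a list of closed groups starting at `base`.
def sepPsums (base : Nat) : List (List (String × String × String × String)) → List Int
  | [] => []
  | g :: gs => ((base + g.length : Nat) : Int) :: sepPsums (base + g.length) gs

theorem sepPsums_append (acc : List (List (String × String × String × String)))
    (cur : List (String × String × String × String)) :
    ∀ base : Nat, sepPsums base (acc ++ [cur]) =
      sepPsums base acc ++ [((base + acc.flatten.length + cur.length : Nat) : Int)] := by
  induction acc with
  | nil => intro base; simp [sepPsums]
  | cons g gs ih =>
      intro base
      simp only [List.cons_append, sepPsums, List.flatten_cons, List.length_append, ih]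
      have h : base + g.length + gs.flatten.length + cur.length =
          base + (g.length + gs.flatten.length) + cur.length := by omega
      rw [h]

theorem sepSlices (acc : List (List (String × String × String × String))) :
    ∀ (pre cur : List (String × String × String × String)),
    (List.zip (((pre.length : Nat) : Int) :: sepPsums pre.length acc) (sepPsums pre.length acc)).map
        (fun p => PySem.List.slice (pre ++ (acc.flatten ++ cur)) (some p.1) (some p.2)) = acc := by
  induction acc with
  | nil => intro pre cur; simp [sepPsums]
  | cons g gs ih =>
      intro pre cur
      simp only [sepPsums, List.zip_cons_cons, List.map_cons, List.flatten_cons]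
      congr 1
      · rw [PySem.List.slice_natCast]
        have h1 : pre ++ (g ++ gs.flatten ++ cur) = pre ++ (g ++ (gs.flatten ++ cur)) := by simp
        rw [h1, List.drop_left, Nat.add_sub_cancel_left, List.take_left]
      · have := ih (pre ++ g) cur
        simpa using this

theorem sepMain (rows : List (List String)) :
    ∀ (acc : List (List (String × String × String × String)))
      (cur : List (String × String × String × String)),
    sepLoopA rows cur acc =
      (fun st => (List.zip ((0 : Int) :: st.2) st.2).map
          (fun p => PySem.List.slice st.1 (some p.1) (some p.2)))
        (sepLoopB rows (acc.flatten ++ cur) (sepPsums 0 acc)) := by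
  induction rows with
  | nil =>
      intro acc cur
      have := sepSlices acc [] cur
      simpa [sepLoopA, sepLoopB] using this.symm
  | cons r rs ih =>
      intro acc cur
      by_cases h3 : PySem.List.pyGetD r 3 "" == "1"
      · have hb : sepPsums 0 acc ++ [(((acc.flatten ++ cur).length : Nat) : Int)] =
            sepPsums 0 (acc ++ [cur]) := by
          rw [sepPsums_append acc cur 0]
          simp
        by_cases h0 : PySem.List.pyGetD r 0 "" == "end"
        · have := sepSlices (acc ++ [cur]) [] []
          simp only [sepLoopA, sepLoopB, h3, if_true, h0, hb]
          simpa using this.symm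
        · simp only [sepLoopA, sepLoopB, h3, if_true, h0, hb]
          have := ih (acc ++ [cur])
            [(PySem.List.pyGetD r 0 "", PySem.List.pyGetD r 1 "", PySem.List.pyGetD r 2 "", PySem.List.pyGetD r 3 "")]
          simpa using this
      · by_cases h0 : PySem.List.pyGetD r 0 "" == "end"
        · have := sepSlices acc [] cur
          simp only [sepLoopA, sepLoopB, h3, h0, if_true]
          simpa using this.symm
        · simp only [sepLoopA, sepLoopB, h3, h0]
          have := ih acc
            (cur ++ [(PySem.List.pyGetD r 0 "", PySem.List.pyGetD r 1 "", PySem.List.pyGetD r 2 "", PySem.List.pyGetD r 3 "")])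
          simpa using this

-- ===== VERDICT (by name: the statement is the Claim_ definition above) =====
theorem separate_connections_spec : Claim_equal_separate_connections := by
  intro drawing _ _
  show separate_connections drawing = separate_connections_alt drawing
  unfold separate_connections separate_connections_alt
  rw [PySem.List.slice_from_one]
  have := sepMain drawing.tail [] []
  simpa [sepPsums] using this
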